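-- pv_equiv track=rewrite | github.com/mehrdadbakhtiari/adVNTR | hmm_utils.py | get_repeating_pattern_lengths
-- ===== SOURCE A (Python) =====
-- def is_matching_state(state_name):
--     if state_name.startswith('M') or state_name.startswith('I') or state_name.startswith('start_random_matches') \
--             or state_name.startswith('end_random_matches'):
--         return True
--     return False
--
-- def get_repeating_pattern_lengths(visited_states):
--     lengths = []
--     prev_start = None
--     for i in range(len(visited_states)):
--         if visited_states[i].startswith('unit_end') and prev_start is not None:
--             current_len = 0
--             for j in range(prev_start, i):
--                 if is_matching_state(visited_states[j]):
--                     current_len += 1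
--             lengths.append(current_len)
--         if visited_states[i].startswith('unit_start'):
--             prev_start = i
--     return lengths
-- ===== SOURCE B (Python) =====
-- def is_matching_state(state_name):
--     if state_name.startswith('M') or state_name.startswith('I') or state_name.startswith('start_random_matches') \
--             or state_name.startswith('end_random_matches'):
--         return True
--     return False
--
-- def get_repeating_pattern_lengths(visited_states):
--     # One pass: keep a running count of matching states since the last 'unit_start'
--     # instead of rescanning the window for every 'unit_end'.
--     lengths = []
--     active = False
--     count = 0
--     for state in visited_states:
--         if state.startswith('unit_end') and active:
--             lengths.append(count)
--         if state.startswith('unit_start'):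
--             active = True
--             count = 0
--         if is_matching_state(state):
--             count += 1
--     return lengths
-- ===== Notes on version B (the rewrite author's own statement) =====
-- stated objective: alternative
-- what changed: Replaces the inner rescan of the window [prev_start, i) at every 'unit_end' with a single pass that maintains a running count of matching states since the last 'unit_start'.
import Mathlib
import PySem

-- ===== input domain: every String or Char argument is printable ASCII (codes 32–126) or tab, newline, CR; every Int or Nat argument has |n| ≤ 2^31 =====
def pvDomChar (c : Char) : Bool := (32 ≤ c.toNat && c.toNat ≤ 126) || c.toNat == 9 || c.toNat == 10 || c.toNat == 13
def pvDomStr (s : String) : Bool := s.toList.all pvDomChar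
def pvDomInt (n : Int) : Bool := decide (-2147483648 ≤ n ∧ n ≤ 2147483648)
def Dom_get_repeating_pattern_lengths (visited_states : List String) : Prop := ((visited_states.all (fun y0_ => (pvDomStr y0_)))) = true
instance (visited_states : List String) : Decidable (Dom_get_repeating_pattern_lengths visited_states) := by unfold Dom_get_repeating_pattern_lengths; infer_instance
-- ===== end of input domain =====

-- B replaces A's inner rescan of [prev_start, i) at each 'unit_end' by one pass with a running count of matching states.


-- ===== PORT A =====
def is_matching_state (state_name : String) : Bool :=
  if PySem.Str.startswith state_name "M" || PySem.Str.startswith state_name "I" ||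
      PySem.Str.startswith state_name "start_random_matches" ||
      PySem.Str.startswith state_name "end_random_matches" then true else false

-- A's inner loop: 'for j in range(prev_start, i): if is_matching_state(...): current_len += 1'
def innerCountA (vs : List String) (p i : Int) : Int :=
  (PySem.List.pyRange p i 1).foldl
    (fun cur j => if is_matching_state (PySem.List.pyGetD vs j "") then cur + 1 else cur) 0

-- A's loop body for one index i
def stepA (vs : List String) (st : List Int × Option Int) (i : Int) : List Int × Option Int :=
  let lengths :=
    match st.2 with
    | some p =>
        if PySem.Str.startswith (PySem.List.pyGetD vs i "") "unit_end" then
          st.1 ++ [innerCountA vs p i]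
        else st.1
    | none => st.1
  let prev_start :=
    if PySem.Str.startswith (PySem.List.pyGetD vs i "") "unit_start" then some i else st.2
  (lengths, prev_start)

def get_repeating_pattern_lengths (visited_states : List String) : List Int :=
  ((PySem.List.pyRange 0 visited_states.length 1).foldl (stepA visited_states) ([], none)).1

-- ===== PORT B =====
-- B's loop body for one state
def stepB (st : List Int × Bool × Int) (state : String) : List Int × Bool × Int :=
  let lengths :=
    if PySem.Str.startswith state "unit_end" && st.2.1 then st.1 ++ [st.2.2] else st.1
  let ac := if PySem.Str.startswith state "unit_start" then (true, (0 : Int)) else (st.2.1, st.2.2)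
  let count := if is_matching_state state then ac.2 + 1 else ac.2
  (lengths, ac.1, count)

def get_repeating_pattern_lengths_alt (visited_states : List String) : List Int :=
  (visited_states.foldl stepB ([], false, 0)).1

-- ===== PRECONDITION & SPEC =====
def Spec_get_repeating_pattern_lengths (visited_states : List String) (out : List Int) : Prop := out = get_repeating_pattern_lengths_alt visited_states
instance (visited_states : List String) (out : List Int) : Decidable (Spec_get_repeating_pattern_lengths visited_states out) := by unfold Spec_get_repeating_pattern_lengths; infer_instance

-- ===== CLAIM (what is proved, stated in full; the proofs are below) =====
def Claim_equal_get_repeating_pattern_lengths : Prop := ∀ (visited_states : List String), Dom_get_repeating_pattern_lengths visited_states → Spec_get_repeating_pattern_lengths visited_states (get_repeating_pattern_lengths visited_states)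

-- ===== LEMMAS AND PROOFS =====

lemma innerCountA_self (vs : List String) (k : Int) : innerCountA vs k k = 0 := by
  simp [innerCountA, PySem.List.pyRange_one_eq_nil le_rfl]

lemma innerCountA_succ (vs : List String) (p k : Int) (h : p ≤ k) :
    innerCountA vs p (k + 1) =
      innerCountA vs p k + (if is_matching_state (PySem.List.pyGetD vs k "") then 1 else 0) := by
  unfold innerCountA
  rw [PySem.List.pyRange_one_succ_right h, List.foldl_append]
  simp only [List.foldl_cons, List.foldl_nil]
  split <;> simp

lemma pyGetD_mid (pre rest : List String) (s : String) :
    PySem.List.pyGetD (pre ++ s :: rest) ((pre.length : Int)) "" = s := by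
  rw [PySem.List.pyGetD_natCast]
  simp

lemma loop_eq (vs : List String) :
    ∀ (rest pre : List String) (acc : List Int) (ps : Option Int) (active : Bool) (count : Int),
      vs = pre ++ rest →
      active = ps.isSome →
      (∀ p, ps = some p → 0 ≤ p ∧ p ≤ (pre.length : Int) ∧ count = innerCountA vs p pre.length) →
      ((PySem.List.pyRange (pre.length) ((pre.length : Int) + rest.length) 1).foldl (stepA vs) (acc, ps)).1
        = (rest.foldl stepB (acc, active, count)).1 := by
  intro rest
  induction rest with
  | nil =>
      intro pre acc ps active count _ _ _
      simp
  | cons s rest' ih =>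
      intro pre acc ps active count hvs hac hcnt
      subst hac
      have hk : (pre.length : Int) < (pre.length : Int) + ((s :: rest').length : Int) := by
        simp only [List.length_cons]; push_cast; omega
      rw [PySem.List.pyRange_one_cons hk]
      have hget : PySem.List.pyGetD vs ((pre.length : Int)) "" = s := by
        rw [hvs]; exact pyGetD_mid pre rest' s
      have hb : (pre.length : Int) + ((s :: rest').length : Int)
          = (((pre ++ [s]).length : Int)) + (rest'.length : Int) := by
        simp only [List.length_append, List.length_cons, List.length_nil]; push_cast; omega
      have ha : (pre.length : Int) + 1 = ((pre ++ [s]).length : Int) := by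
        simp only [List.length_append, List.length_cons, List.length_nil]; push_cast; omega
      have hvs' : vs = (pre ++ [s]) ++ rest' := by simp [hvs]
      have hlen0 : (0 : Int) ≤ (pre.length : Int) := by positivity
      rw [List.foldl_cons, List.foldl_cons, hb]
      rcases ps with _ | p <;>
        simp only [Option.isSome_none, Option.isSome_some]
      · -- prev_start is None, active is false
        by_cases hus : PySem.Str.startswith s "unit_start" = true
        · have hus' : PySem.Chars.startswith s.toList ['u','n','i','t','_','s','t','a','r','t'] = true := by
            simpa using hus
          have hA : stepA vs (acc, none) ((pre.length : Int)) = (acc, some ((pre.length : Int))) := by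
            simp [stepA, hget, hus']
          have hB : stepB (acc, false, count) s
              = (acc, true, if is_matching_state s then (0 : Int) + 1 else 0) := by
            simp [stepB, hus']
          rw [hA, hB, ha]
          apply ih (pre ++ [s]) _ _ _ _ hvs' (by simp)
          intro p' hp'
          simp only [Option.some.injEq] at hp'
          subst hp'
          refine ⟨hlen0, by rw [← ha]; omega, ?_⟩
          rw [← ha, innerCountA_succ vs _ _ le_rfl, innerCountA_self, hget]
          split <;> simp
        · have hus' : PySem.Chars.startswith s.toList ['u','n','i','t','_','s','t','a','r','t'] = false := by
            simpa using hus
          have hA : stepA vs (acc, none) ((pre.length : Int)) = (acc, none) := by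
            simp [stepA, hget, hus']
          have hB : stepB (acc, false, count) s
              = (acc, false, if is_matching_state s then count + 1 else count) := by
            simp [stepB, hus']
          rw [hA, hB, ha]
          apply ih (pre ++ [s]) _ _ _ _ hvs' (by simp)
          intro p' hp'
          simp at hp'
      · -- prev_start = some p, active is true
        obtain ⟨hp0, hpk, hcount⟩ := hcnt p rfl
        by_cases hus : PySem.Str.startswith s "unit_start" = true
        · have hus' : PySem.Chars.startswith s.toList ['u','n','i','t','_','s','t','a','r','t'] = true := by
            simpa using hus
          have hA : stepA vs (acc, some p) ((pre.length : Int))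
              = ((if PySem.Chars.startswith s.toList ['u','n','i','t','_','e','n','d'] = true then acc ++ [count] else acc),
                 some ((pre.length : Int))) := by
            simp [stepA, hget, hus', hcount]
          have hB : stepB (acc, true, count) s
              = ((if PySem.Chars.startswith s.toList ['u','n','i','t','_','e','n','d'] = true then acc ++ [count] else acc),
                 true, if is_matching_state s then (0 : Int) + 1 else 0) := by
            simp [stepB, hus']
          rw [hA, hB, ha]
          apply ih (pre ++ [s]) _ _ _ _ hvs' (by simp)
          intro p' hp'
          simp only [Option.some.injEq] at hp'
          subst hp'
          refine ⟨hlen0, by rw [← ha]; omega, ?_⟩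
          rw [← ha, innerCountA_succ vs _ _ le_rfl, innerCountA_self, hget]
          split <;> simp
        · have hus' : PySem.Chars.startswith s.toList ['u','n','i','t','_','s','t','a','r','t'] = false := by
            simpa using hus
          have hA : stepA vs (acc, some p) ((pre.length : Int))
              = ((if PySem.Chars.startswith s.toList ['u','n','i','t','_','e','n','d'] = true then acc ++ [count] else acc),
                 some p) := by
            simp [stepA, hget, hus', hcount]
          have hB : stepB (acc, true, count) s
              = ((if PySem.Chars.startswith s.toList ['u','n','i','t','_','e','n','d'] = true then acc ++ [count] else acc),
                 true, if is_matching_state s then count + 1 else count) := by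
            simp [stepB, hus']
          rw [hA, hB, ha]
          apply ih (pre ++ [s]) _ _ _ _ hvs' (by simp)
          intro p' hp'
          simp only [Option.some.injEq] at hp'
          subst hp'
          refine ⟨hp0, by rw [← ha]; omega, ?_⟩
          rw [← ha, innerCountA_succ vs _ _ hpk, hget, hcount]
          split <;> simp

-- ===== VERDICT (by name: the statement is the Claim_ definition above) =====
theorem get_repeating_pattern_lengths_spec : Claim_equal_get_repeating_pattern_lengths := by
  intro vs _
  unfold Spec_get_repeating_pattern_lengths get_repeating_pattern_lengths get_repeating_pattern_lengths_alt
  have := loop_eq vs vs [] [] none false 0 (by simp) (by simp) (by intro p hp; cases hp)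
  simpa using this
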